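-- pv_equiv track=rewrite | github.com/phamtranminhtri/MM241-Assignment-Group18 | student_submissions/s2210xxx/Policy2210547_2212643_2212069_2213293_2210644.py | group_small_items
-- ===== SOURCE A (Python) =====
-- def group_small_items(narrow_prods, max_width):
--     """
--     Gom nhóm sản phẩm nhỏ thành các khối lớn hơn để đóng gói hiệu quả.
--     """
--     grouped_items = []
--     current_width, max_height = 0, 0
--
--     for prod in narrow_prods:
--         prod_w, prod_h = prod["size"]
--         if current_width + prod_w > max_width:
--             grouped_items.append({"size": (current_width, max_height)})
--             current_width, max_height = 0, 0
--         current_width += prod_w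
--         max_height = max(max_height, prod_h)
--
--     if current_width > 0:
--         grouped_items.append({"size": (current_width, max_height)})
--
--     return grouped_items
-- ===== SOURCE B (Python) =====
-- def group_small_items(narrow_prods, max_width):
--     # Pass 1: partition the items into width-bounded groups of (w, h) pairs.
--     groups = []
--     cur = []
--     cur_w = 0
--     for prod in narrow_prods:
--         w, h = prod["size"]
--         if cur_w + w > max_width:
--             groups.append(cur)
--             cur = [(w, h)]
--             cur_w = w
--         else:
--             cur.append((w, h))
--             cur_w += w
--     if cur_w > 0:
--         groups.append(cur)
--     # Pass 2: aggregate each group into its block.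
--     return [{"size": (sum(w for w, _ in g), max([0] + [h for _, h in g]))}
--             for g in groups]
-- ===== Notes on version B (the rewrite author's own statement) =====
-- stated objective: alternative
-- what changed: Splits A's single accumulating loop into two passes: a partition pass that builds the actual groups of (w,h) pairs, then an aggregation pass mapping each group to its summed width and clamped max height.
import Mathlib
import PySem

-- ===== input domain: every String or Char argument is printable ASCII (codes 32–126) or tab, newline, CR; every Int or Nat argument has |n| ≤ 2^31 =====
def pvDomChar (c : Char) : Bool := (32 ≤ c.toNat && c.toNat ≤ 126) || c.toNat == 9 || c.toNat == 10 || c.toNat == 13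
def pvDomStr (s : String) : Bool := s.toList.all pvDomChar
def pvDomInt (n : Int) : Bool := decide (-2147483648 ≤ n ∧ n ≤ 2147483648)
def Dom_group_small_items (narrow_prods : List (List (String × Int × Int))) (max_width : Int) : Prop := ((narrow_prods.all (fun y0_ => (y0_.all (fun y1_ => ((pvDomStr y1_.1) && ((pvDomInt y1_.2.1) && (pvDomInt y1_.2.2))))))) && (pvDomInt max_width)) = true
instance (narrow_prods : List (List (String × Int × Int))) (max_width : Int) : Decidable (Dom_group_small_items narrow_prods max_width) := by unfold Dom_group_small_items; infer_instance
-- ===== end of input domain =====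

-- B splits A's single accumulating loop into a partition pass followed by an aggregation pass
-- (objective: alternative decomposition, same cost).

-- shared helper: prod["size"] (first entry with key "size"; default value never used inside Pre_)
def pvGetSize (prod : List (String × Int × Int)) : Int × Int :=
  match prod.find? (fun e => e.1 == "size") with
  | some e => (e.2.1, e.2.2)
  | none => (0, 0)

-- ===== PORT A =====
-- loop body of A, named so the proofs can talk about it
def pvStepA (max_width : Int) (st : List (List (String × Int × Int)) × Int × Int)
    (prod : List (String × Int × Int)) : List (List (String × Int × Int)) × Int × Int :=
  let pw := (pvGetSize prod).1
  let ph := (pvGetSize prod).2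
  let st' := if st.2.1 + pw > max_width
    then (st.1 ++ [[("size", st.2.1, st.2.2)]], (0 : Int), (0 : Int))
    else st
  (st'.1, st'.2.1 + pw, max st'.2.2 ph)

def group_small_items (narrow_prods : List (List (String × Int × Int))) (max_width : Int) : List (List (String × Int × Int)) :=
  let fin := narrow_prods.foldl (pvStepA max_width) ([], 0, 0)
  if fin.2.1 > 0 then fin.1 ++ [[("size", fin.2.1, fin.2.2)]] else fin.1

-- ===== PORT B =====
-- pass 1: partition into groups of (w, h) pairs, tracking the running width
def pvPartStep (max_width : Int) (st : List (List (Int × Int)) × List (Int × Int) × Int)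
    (prod : List (String × Int × Int)) : List (List (Int × Int)) × List (Int × Int) × Int :=
  let w := (pvGetSize prod).1
  let h := (pvGetSize prod).2
  if st.2.2 + w > max_width then (st.1 ++ [st.2.1], [(w, h)], w)
  else (st.1, st.2.1 ++ [(w, h)], st.2.2 + w)

-- pass 2: aggregate one group: summed width, max height clamped at 0
def pvAgg (g : List (Int × Int)) : List (String × Int × Int) :=
  [("size", (g.map (·.1)).sum, g.foldl (fun m p => max m p.2) 0)]

def group_small_items_alt (narrow_prods : List (List (String × Int × Int))) (max_width : Int) : List (List (String × Int × Int)) :=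
  let st := narrow_prods.foldl (pvPartStep max_width) ([], [], 0)
  let groups := if st.2.2 > 0 then st.1 ++ [st.2.1] else st.1
  groups.map pvAgg

-- ===== PRECONDITION & SPEC =====
-- Pre_ excludes exactly the inputs where A raises KeyError: some prod lacks a "size" key.
def Pre_group_small_items (narrow_prods : List (List (String × Int × Int))) (_max_width : Int) : Prop :=
  ∀ prod ∈ narrow_prods, prod.any (fun e => e.1 == "size") = true
instance (narrow_prods : List (List (String × Int × Int))) (max_width : Int) : Decidable (Pre_group_small_items narrow_prods max_width) := by unfold Pre_group_small_items; infer_instance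

def pvWitness_group_small_items : (List (List (String × Int × Int))) × Int :=
  ([[("size", 2, 3)], [("size", 1, 1)], [("size", 4, 2)]], 3)

def Spec_group_small_items (narrow_prods : List (List (String × Int × Int))) (max_width : Int) (out : List (List (String × Int × Int))) : Prop := out = group_small_items_alt narrow_prods max_width
instance (narrow_prods : List (List (String × Int × Int))) (max_width : Int) (out : List (List (String × Int × Int))) : Decidable (Spec_group_small_items narrow_prods max_width out) := by unfold Spec_group_small_items; infer_instance

-- ===== CLAIM (what is proved, stated in full; the proofs are below) =====
def Claim_equal_group_small_items : Prop := ∀ (narrow_prods : List (List (String × Int × Int))) (max_width : Int), Dom_group_small_items narrow_prods max_width → Pre_group_small_items narrow_prods max_width → Spec_group_small_items narrow_prods max_width (group_small_items narrow_prods max_width)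

-- ===== LEMMAS AND PROOFS =====

def pvWsum (g : List (Int × Int)) : Int := (g.map (·.1)).sum
def pvHmax (g : List (Int × Int)) : Int := g.foldl (fun m p => max m p.2) 0

lemma pvWsum_append (g : List (Int × Int)) (x : Int × Int) :
    pvWsum (g ++ [x]) = pvWsum g + x.1 := by
  simp [pvWsum]

lemma pvHmax_append (g : List (Int × Int)) (x : Int × Int) :
    pvHmax (g ++ [x]) = max (pvHmax g) x.2 := by
  simp [pvHmax, List.foldl_append]

lemma pvAgg_eq (g : List (Int × Int)) : pvAgg g = [("size", pvWsum g, pvHmax g)] := rfl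

lemma pv_loop_inv (max_width : Int) (ps : List (List (String × Int × Int)))
    (groups : List (List (Int × Int))) (cur : List (Int × Int)) :
    ps.foldl (pvStepA max_width) (groups.map pvAgg, pvWsum cur, pvHmax cur)
    = (let b := ps.foldl (pvPartStep max_width) (groups, cur, pvWsum cur)
       (b.1.map pvAgg, b.2.2, pvHmax b.2.1)) ∧
    (ps.foldl (pvPartStep max_width) (groups, cur, pvWsum cur)).2.2
      = pvWsum (ps.foldl (pvPartStep max_width) (groups, cur, pvWsum cur)).2.1 := by
  induction ps generalizing groups cur with
  | nil => exact ⟨rfl, rfl⟩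
  | cons p ps ih =>
    simp only [List.foldl_cons]
    by_cases hc : pvWsum cur + (pvGetSize p).1 > max_width
    · have h1 : pvPartStep max_width (groups, cur, pvWsum cur) p
          = (groups ++ [cur], [((pvGetSize p).1, (pvGetSize p).2)],
             pvWsum [((pvGetSize p).1, (pvGetSize p).2)]) := by
        simp only [pvPartStep]
        rw [if_pos hc]
        simp [pvWsum]
      have h2 : pvStepA max_width (groups.map pvAgg, pvWsum cur, pvHmax cur) p
          = ((groups ++ [cur]).map pvAgg, pvWsum [((pvGetSize p).1, (pvGetSize p).2)],
             pvHmax [((pvGetSize p).1, (pvGetSize p).2)]) := by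
        simp only [pvStepA]
        rw [if_pos hc]
        simp [pvAgg_eq, pvWsum, pvHmax]
      rw [h1, h2]
      exact ih (groups ++ [cur]) [((pvGetSize p).1, (pvGetSize p).2)]
    · have h1 : pvPartStep max_width (groups, cur, pvWsum cur) p
          = (groups, cur ++ [((pvGetSize p).1, (pvGetSize p).2)],
             pvWsum cur + (pvGetSize p).1) := by
        simp [pvPartStep, hc]
      have h2 : pvStepA max_width (groups.map pvAgg, pvWsum cur, pvHmax cur) p
          = (groups.map pvAgg, pvWsum (cur ++ [((pvGetSize p).1, (pvGetSize p).2)]),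
             pvHmax (cur ++ [((pvGetSize p).1, (pvGetSize p).2)])) := by
        simp only [pvStepA]
        rw [if_neg hc]
        rw [pvWsum_append, pvHmax_append]
      rw [h1, h2]
      have hw : pvWsum cur + (pvGetSize p).1
          = pvWsum (cur ++ [((pvGetSize p).1, (pvGetSize p).2)]) := by
        rw [pvWsum_append]
      rw [hw]
      exact ih groups (cur ++ [((pvGetSize p).1, (pvGetSize p).2)])

-- ===== VERDICT (by name: the statement is the Claim_ definition above) =====
theorem group_small_items_spec : Claim_equal_group_small_items := by
  intro ps mw _ _
  unfold Spec_group_small_items group_small_items group_small_items_alt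
  have h := pv_loop_inv mw ps [] []
  simp only [List.map_nil] at h
  have h0 : pvWsum ([] : List (Int × Int)) = 0 := rfl
  have hh0 : pvHmax ([] : List (Int × Int)) = 0 := rfl
  rw [h0, hh0] at h
  obtain ⟨h1, h2⟩ := h
  simp only [h1]
  by_cases hpos : (ps.foldl (pvPartStep mw) ([], [], 0)).2.2 > 0
  · rw [if_pos hpos, if_pos hpos]
    simp [pvAgg_eq, h2]
  · rw [if_neg hpos, if_neg hpos]
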